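-- pv_equiv track=rewrite | github.com/MichalZnalezniak/Chunking-Vis | chunker/utils.py | chunks_to_html
-- ===== SOURCE A (Python) =====
-- def chunks_to_html(chunks):
--     colors = ["#FFF3B0", "#FFD5C2", "#CCF2D0", "#D6E6F2", "#E5D9F2"]
--     overlap_color = "#d3d3d3"  # gray
--
--     html_parts = []
--     base_index = 0
--     for text, is_overlap in chunks:
--         if is_overlap:
--             color = overlap_color
--         else:
--             color = colors[base_index % len(colors)]
--             if text.strip() != "":
--                 base_index += 1
--         html_parts.append(f'<span style="white-space: pre-line; background-color:{color}">{text}</span>')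
--     return "".join(html_parts)
-- ===== SOURCE B (Python) =====
-- def chunks_to_html(chunks):
--     colors = ["#FFF3B0", "#FFD5C2", "#CCF2D0", "#D6E6F2", "#E5D9F2"]
--     overlap_color = "#d3d3d3"
--
--     def color_at(i, is_overlap):
--         # Stateless characterization: a non-overlap chunk's color index is the
--         # number of non-overlap, non-blank chunks strictly before it.
--         if is_overlap:
--             return overlap_color
--         rank = sum(1 for t, o in chunks[:i] if not o and t.strip() != "")
--         return colors[rank % len(colors)]
--
--     return "".join(
--         f'<span style="white-space: pre-line; background-color:{color_at(i, ov)}">{text}</span>'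
--         for i, (text, ov) in enumerate(chunks)
--     )
-- ===== Notes on version B (the rewrite author's own statement) =====
-- stated objective: alternative
-- what changed: Replaces A's threaded mutable counter with a stateless closed form: each chunk's color is computed independently from the count of non-overlap non-blank chunks in its prefix, formatted in one comprehension over enumerate.
import Mathlib
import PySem

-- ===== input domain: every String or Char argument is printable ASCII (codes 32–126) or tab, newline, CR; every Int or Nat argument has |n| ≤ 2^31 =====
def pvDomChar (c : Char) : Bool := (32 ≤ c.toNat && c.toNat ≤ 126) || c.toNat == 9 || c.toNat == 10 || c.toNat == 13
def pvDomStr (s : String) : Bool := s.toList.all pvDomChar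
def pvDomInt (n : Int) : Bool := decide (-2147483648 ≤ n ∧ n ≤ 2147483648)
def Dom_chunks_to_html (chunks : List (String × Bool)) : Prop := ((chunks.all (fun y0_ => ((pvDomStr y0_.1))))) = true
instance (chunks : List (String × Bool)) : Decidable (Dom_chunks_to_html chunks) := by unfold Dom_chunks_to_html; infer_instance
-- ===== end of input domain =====

-- B replaces A's threaded mutable counter with a stateless closed form (color index = prefix count of non-overlap non-blank chunks); alternative decomposition, quadratic instead of linear counter maintenance.

-- ===== PORT A =====
def pvColorsA : List String := ["#FFF3B0", "#FFD5C2", "#CCF2D0", "#D6E6F2", "#E5D9F2"]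

def pvSpan (text color : String) : String :=
  "<span style=\"white-space: pre-line; background-color:" ++ color ++ "\">" ++ text ++ "</span>"

-- the loop body of A: state = (html_parts, base_index)
def pvStepA (st : List String × Int) (tb : String × Bool) : List String × Int :=
  if tb.2 then
    (st.1 ++ [pvSpan tb.1 "#d3d3d3"], st.2)
  else
    let color := PySem.List.pyGetD pvColorsA (PySem.Int.mod st.2 (PySem.List.len pvColorsA)) ""
    let idx := if PySem.Str.strip tb.1 ≠ "" then st.2 + 1 else st.2
    (st.1 ++ [pvSpan tb.1 color], idx)

def chunks_to_html (chunks : List (String × Bool)) : String :=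
  PySem.Str.join "" (chunks.foldl pvStepA ([], 0)).1

-- ===== PORT B =====
def pvColorsB : List String := ["#FFF3B0", "#FFD5C2", "#CCF2D0", "#D6E6F2", "#E5D9F2"]

-- the predicate of B's generator-sum: non-overlap and non-blank
def pvFlag (p : String × Bool) : Bool := !p.2 && (PySem.Str.strip p.1 != "")

-- B's color_at(i, is_overlap): stateless, recounts the prefix chunks[:i]
def pvColorAt (chunks : List (String × Bool)) (i : Int) (ov : Bool) : String :=
  if ov then "#d3d3d3"
  else
    let rank : Int := ((PySem.List.slice chunks none (some i)).countP pvFlag : Int)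
    PySem.List.pyGetD pvColorsB (PySem.Int.mod rank (PySem.List.len pvColorsB)) ""

def chunks_to_html_alt (chunks : List (String × Bool)) : String :=
  PySem.Str.join ""
    ((PySem.List.enumerate chunks).map (fun ip => pvSpan ip.2.1 (pvColorAt chunks ip.1 ip.2.2)))

-- ===== PRECONDITION & SPEC =====
def Spec_chunks_to_html (chunks : List (String × Bool)) (out : String) : Prop := out = chunks_to_html_alt chunks
instance (chunks : List (String × Bool)) (out : String) : Decidable (Spec_chunks_to_html chunks out) := by unfold Spec_chunks_to_html; infer_instance

-- ===== CLAIM =====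
def Claim_equal_chunks_to_html : Prop := ∀ (chunks : List (String × Bool)), Dom_chunks_to_html chunks → Spec_chunks_to_html chunks (chunks_to_html chunks)

-- ===== LEMMAS AND PROOFS =====

-- common reference point for the two ports: the span list with the counter threaded explicitly
def pvSpansAux : List (String × Bool) → Nat → List String
  | [], _ => []
  | (t, ov) :: rest, c =>
    pvSpan t (if ov then "#d3d3d3"
              else PySem.List.pyGetD pvColorsA (PySem.Int.mod (c : Int) (PySem.List.len pvColorsA)) "")
      :: pvSpansAux rest (c + (if pvFlag (t, ov) then 1 else 0))

-- A's fold realises pvSpansAux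
theorem pvFoldA_eq (l : List (String × Bool)) (acc : List String) (c : Nat) :
    (l.foldl pvStepA (acc, (c : Int))).1 = acc ++ pvSpansAux l c := by
  induction l generalizing acc c with
  | nil => simp [pvSpansAux]
  | cons hd tl ih =>
    obtain ⟨t, ov⟩ := hd
    cases ov with
    | true => simp [pvStepA, pvSpansAux, pvFlag, ih]
    | false =>
      by_cases h : PySem.Str.strip t ≠ ""
      · simpa [pvStepA, pvSpansAux, pvFlag, h, Nat.cast_add] using
          ih (acc ++ [pvSpan t (PySem.List.pyGetD pvColorsA (PySem.Int.mod (c : Int) (PySem.List.len pvColorsA)) "")]) (c + 1)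
      · simpa [pvStepA, pvSpansAux, pvFlag, h] using
          ih (acc ++ [pvSpan t (PySem.List.pyGetD pvColorsA (PySem.Int.mod (c : Int) (PySem.List.len pvColorsA)) "")]) c

-- B's stateless map realises pvSpansAux
theorem pvSpansAux_eq_map (l pre : List (String × Bool)) :
    pvSpansAux l (pre.countP pvFlag)
      = (PySem.List.enumerate l (pre.length : Int)).map
          (fun ip => pvSpan ip.2.1 (pvColorAt (pre ++ l) ip.1 ip.2.2)) := by
  induction l generalizing pre with
  | nil => simp [pvSpansAux]
  | cons hd tl ih =>
    obtain ⟨t, ov⟩ := hd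
    have htail := ih (pre ++ [(t, ov)])
    simp [List.countP_append, List.length_append] at htail
    simp [pvSpansAux, PySem.List.enumerate_cons, pvColorAt,
          PySem.List.slice_to_natCast, htail,
          pvColorsA, pvColorsB]

theorem chunks_to_html_spec : Claim_equal_chunks_to_html := by
  intro chunks _
  unfold Spec_chunks_to_html chunks_to_html chunks_to_html_alt
  have hA := pvFoldA_eq chunks [] 0
  have hB := pvSpansAux_eq_map chunks []
  simp at hA hB
  rw [show ((0 : Int) = ((0 : Nat) : Int)) by simp] at *
  rw [hA, hB]
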